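-- pv_equiv track=rewrite | github.com/thanh020801/DQN_caro_game_20x20 | caro_part5.py | count_continuity
-- ===== SOURCE A (Python) =====
-- WIN_STATE = 5
--
-- def count_continuity(arr, player):
-- 	count1 = 0
-- 	max_count_user1  = 0
--
-- 	for i in range(len(arr)):
-- 		if arr[i] == player:
-- 			count1+=1
-- 			if count1 > max_count_user1:
-- 				max_count_user1 = count1
-- 		else:
-- 			count1 = 0
-- 	if max_count_user1 >= WIN_STATE:
-- 		return True
-- 	return False
-- ===== SOURCE B (Python) =====
-- WIN_STATE = 5
--
-- def count_continuity(arr, player):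
-- 	# Scan by maximal runs: find the end of each run of equal cells, test it, jump past it.
-- 	i = 0
-- 	n = len(arr)
-- 	while i < n:
-- 		j = i + 1
-- 		while j < n and arr[j] == arr[i]:
-- 			j += 1
-- 		if arr[i] == player and j - i >= WIN_STATE:
-- 			return True
-- 		i = j
-- 	return False
-- ===== Notes on version B (the rewrite author's own statement) =====
-- stated objective: alternative
-- what changed: Replaces the single element loop threading a running counter and running maximum with a run-jumping two-pointer scan: find the end of each maximal run of equal cells, return True as soon as a run of the player reaches WIN_STATE, otherwise jump past the run; no maximum is maintained and it returns early.
import Mathlib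
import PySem

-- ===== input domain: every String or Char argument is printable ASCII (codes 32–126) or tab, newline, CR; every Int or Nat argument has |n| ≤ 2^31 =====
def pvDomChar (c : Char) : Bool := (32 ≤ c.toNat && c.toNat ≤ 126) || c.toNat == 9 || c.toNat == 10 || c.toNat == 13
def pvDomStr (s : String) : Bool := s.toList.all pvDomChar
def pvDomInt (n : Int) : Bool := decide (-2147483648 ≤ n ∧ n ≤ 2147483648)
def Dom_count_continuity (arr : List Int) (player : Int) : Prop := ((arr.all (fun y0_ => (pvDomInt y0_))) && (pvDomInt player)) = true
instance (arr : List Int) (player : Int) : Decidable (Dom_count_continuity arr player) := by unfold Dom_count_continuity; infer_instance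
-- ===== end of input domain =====

-- B replaces A's running-counter/running-max index loop with a run-jumping scan
-- (measure each maximal run, early-return on a player run of length ≥ 5): alternative decomposition, same O(n) cost.


-- ===== PORT A =====
-- one loop step of A: update (count1, max_count_user1) with the current cell
def countStep (player : Int) (s : Int × Int) (x : Int) : Int × Int :=
  if x = player then
    let c := s.1 + 1
    (c, if c > s.2 then c else s.2)
  else (0, s.2)

def count_continuity (arr : List Int) (player : Int) : Bool :=
  let st := (PySem.List.pyRange 0 (arr.length : Int) 1).foldl
    (fun s i => countStep player s (PySem.List.pyGetD arr i 0)) (0, 0)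
  if st.2 ≥ 5 then true else false

-- ===== PORT B =====
-- inner while of Source B: advance j while j < n and arr[j] == arr[i]; returns the end of the run
def runEnd (arr : List Int) (x : Int) (j : Nat) : Nat :=
  if h : j < arr.length ∧ PySem.List.pyGetD arr (j : Int) 0 = x then
    runEnd arr x (j + 1)
  else j
termination_by arr.length - j
decreasing_by omega

-- cited by bLoop's decreasing_by: the inner while never moves j backwards
theorem le_runEnd (arr : List Int) (x : Int) : ∀ j, j ≤ runEnd arr x j := by
  intro j
  induction hn : arr.length - j using Nat.strong_induction_on generalizing j with
  | _ n ih =>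
      rw [runEnd]
      split_ifs with h
      · have h1 := ih (arr.length - (j + 1)) (by omega) (j + 1) rfl
        omega
      · exact le_refl j

-- outer while of Source B over the index i, jumping to the end j of the current run
def bLoop (arr : List Int) (player : Int) (i : Nat) : Bool :=
  if h : i < arr.length then
    if PySem.List.pyGetD arr (i : Int) 0 == player
        && decide (5 ≤ runEnd arr (PySem.List.pyGetD arr (i : Int) 0) (i + 1) - i) then
      true
    else bLoop arr player (runEnd arr (PySem.List.pyGetD arr (i : Int) 0) (i + 1))
  else false
termination_by arr.length - i
decreasing_by
  have h1 := le_runEnd arr (PySem.List.pyGetD arr (i : Int) 0) (i + 1)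
  omega

def count_continuity_alt (arr : List Int) (player : Int) : Bool :=
  bLoop arr player 0

-- ===== PRECONDITION & SPEC =====
def Spec_count_continuity (arr : List Int) (player : Int) (out : Bool) : Prop := out = count_continuity_alt arr player
instance (arr : List Int) (player : Int) (out : Bool) : Decidable (Spec_count_continuity arr player out) := by unfold Spec_count_continuity; infer_instance

-- ===== CLAIM (what is proved, stated in full; the proofs are below) =====
def Claim_equal_count_continuity : Prop := ∀ (arr : List Int) (player : Int), Dom_count_continuity arr player → Spec_count_continuity arr player (count_continuity arr player)

-- ===== LEMMAS AND PROOFS =====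

-- proof helper: run-structured view of B's scan (runs as head ++ takeWhile, jump by dropWhile)
def altLoop (player : Int) : List Int → Bool
  | [] => false
  | x :: xs =>
      let k := 1 + (xs.takeWhile (· == x)).length
      if x == player && decide (5 ≤ k) then true
      else altLoop player (xs.dropWhile (· == x))
termination_by l => l.length
decreasing_by
  simp only [List.length_cons]
  exact Nat.lt_succ_of_le (List.length_dropWhile_le _ _)

-- proof helper: "some run of player cells, continuing an initial run of length c, reaches 5"
def runHit (p : Int) (c : Int) : List Int → Bool
  | [] => false
  | x :: xs => if x = p then decide (5 ≤ c + 1) || runHit p (c + 1) xs else runHit p 0 xs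

theorem foldl_max_ge_iff (p : Int) (l : List Int) :
    ∀ c m : Int, (5 ≤ (l.foldl (countStep p) (c, m)).2) ↔ (5 ≤ m ∨ runHit p c l = true) := by
  induction l with
  | nil => intro c m; simp [runHit]
  | cons x xs ih =>
      intro c m
      by_cases hx : x = p
      · simp only [List.foldl_cons, countStep, hx, if_pos rfl, runHit]
        rw [ih]
        by_cases h5 : (5 : Int) ≤ c + 1 <;> by_cases hm : c + 1 > m <;>
          simp [h5, hm] <;> omega
      · simp only [List.foldl_cons, countStep, if_neg hx, runHit, if_neg hx]
        exact ih 0 m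

theorem runHit_run (p : Int) (xs : List Int) :
    ∀ c : Int, c < 5 →
      runHit p c xs =
        (decide (5 ≤ c + ((xs.takeWhile (· == p)).length : Int)) ||
          runHit p 0 (xs.dropWhile (· == p))) := by
  induction xs with
  | nil => intro c hc; simp [runHit]; omega
  | cons x xs ih =>
      intro c hc
      by_cases hx : x = p
      · subst hx
        simp only [runHit, if_pos rfl, List.takeWhile_cons, List.dropWhile_cons,
          BEq.rfl, if_pos rfl, List.length_cons]
        by_cases h5 : (5 : Int) ≤ c + 1
        · have h' : (5 : Int) ≤ c + (((xs.takeWhile (· == x)).length : Int) + 1) := by omega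
          push_cast
          simp [h5, h']
        · rw [ih (c + 1) (by omega)]
          cases hr : runHit x 0 (xs.dropWhile (· == x))
          all_goals
            refine Bool.eq_iff_iff.mpr ?_
            simp [hr]
            try (push_cast [List.length_cons]; omega)
      · have hbx : (x == p) = false := by simp [hx]
        simp only [runHit, if_neg hx, List.takeWhile_cons, List.dropWhile_cons, hbx,
          Bool.false_eq_true, if_neg (by simp : ¬False), List.length_nil]
        simp [runHit, if_neg hx]
        omega

theorem runHit_dropRun (p x : Int) (hx : x ≠ p) (xs : List Int) :
    runHit p 0 xs = runHit p 0 (xs.dropWhile (· == x)) := by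
  induction xs with
  | nil => rfl
  | cons y ys ih =>
      by_cases hy : y = x
      · subst hy
        have hyp : y ≠ p := hx
        simp only [List.dropWhile_cons, BEq.rfl, if_pos rfl, runHit, if_neg hyp]
        exact ih
      · simp [List.dropWhile_cons, hy]

theorem runHit_eq_altLoop (p : Int) (l : List Int) : runHit p 0 l = altLoop p l := by
  induction hn : l.length using Nat.strong_induction_on generalizing l with
  | _ n ih =>
      cases l with
      | nil => simp [runHit, altLoop]
      | cons x xs =>
          simp only [List.length_cons] at hn
          have hdrop : (xs.dropWhile (· == x)).length < n := by
            have := List.length_dropWhile_le (· == x) xs; omega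
          by_cases hx : x = p
          · subst hx
            rw [altLoop]
            simp only [BEq.rfl, Bool.true_and]
            have h1 : runHit x 0 (x :: xs) = runHit x 1 xs := by
              norm_num [runHit]
            rw [h1, runHit_run x xs 1 (by omega), ih _ hdrop _ rfl]
            by_cases h5 : 5 ≤ 1 + (xs.takeWhile (· == x)).length
            · have h5' : (5:Int) ≤ 1 + ((xs.takeWhile (· == x)).length : Int) := by
                exact_mod_cast h5
              simp [h5, h5']
            · have h5' : ¬ (5:Int) ≤ 1 + ((xs.takeWhile (· == x)).length : Int) := by
                push_cast; omega
              simp [h5, h5']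
          · rw [altLoop]
            have hbx : (x == p) = false := by simp [hx]
            simp only [hbx, Bool.false_and, Bool.false_eq_true, if_neg (by simp : ¬False)]
            have h0 : runHit p 0 (x :: xs) = runHit p 0 xs := by
              simp [runHit, hx]
            rw [h0, runHit_dropRun p x hx xs, ih _ hdrop _ rfl]

theorem runEnd_eq (arr : List Int) (x : Int) :
    ∀ j : Nat, runEnd arr x j = j + ((arr.drop j).takeWhile (· == x)).length := by
  intro j
  induction hn : arr.length - j using Nat.strong_induction_on generalizing j with
  | _ n ih =>
      rw [runEnd]
      split_ifs with h
      · obtain ⟨hj, hx⟩ := h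
        rw [ih (arr.length - (j + 1)) (by omega) (j + 1) rfl]
        rw [List.drop_eq_getElem_cons hj, List.takeWhile_cons]
        have hget : arr[j] = x := by
          have := PySem.List.pyGetD_natCast arr j (0 : Int)
          rw [this, List.getD_eq_getElem arr 0 hj] at hx
          exact hx
        simp [hget, List.length_cons]
        omega
      · by_cases hj : j < arr.length
        · have hx : PySem.List.pyGetD arr (j : Int) 0 ≠ x := fun hc => h ⟨hj, hc⟩
          have hget : arr[j] ≠ x := by
            have := PySem.List.pyGetD_natCast arr j (0 : Int)
            rw [this, List.getD_eq_getElem arr 0 hj] at hx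
            exact hx
          rw [List.drop_eq_getElem_cons hj, List.takeWhile_cons]
          simp [hget]
        · rw [List.drop_eq_nil_of_le (by omega)]
          simp

theorem drop_length_takeWhile (x : Int) :
    ∀ l : List Int, l.drop ((l.takeWhile (· == x)).length) = l.dropWhile (· == x) := by
  intro l
  induction l with
  | nil => rfl
  | cons y ys ih =>
      by_cases hy : y = x
      · simp [List.takeWhile_cons, List.dropWhile_cons, hy, ih]
      · simp [List.takeWhile_cons, List.dropWhile_cons, hy]

theorem bLoop_eq_altLoop (arr : List Int) (p : Int) :
    ∀ i : Nat, bLoop arr p i = altLoop p (arr.drop i) := by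
  intro i
  induction hn : arr.length - i using Nat.strong_induction_on generalizing i with
  | _ n ih =>
      by_cases h : i < arr.length
      · have hget : PySem.List.pyGetD arr (i : Int) 0 = arr[i] := by
          rw [PySem.List.pyGetD_natCast arr i (0 : Int), List.getD_eq_getElem arr 0 h]
        have hdrop : arr.drop i = arr[i] :: arr.drop (i + 1) := List.drop_eq_getElem_cons h
        rw [bLoop, dif_pos h, hget, runEnd_eq arr arr[i] (i + 1)]
        have hsub : i + 1 + ((arr.drop (i + 1)).takeWhile (· == arr[i])).length - i
            = 1 + ((arr.drop (i + 1)).takeWhile (· == arr[i])).length := by omega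
        rw [hsub, hdrop]
        simp only [altLoop]
        by_cases hc : (arr[i] == p
            && decide (5 ≤ 1 + ((arr.drop (i + 1)).takeWhile (· == arr[i])).length)) = true
        · rw [if_pos hc, if_pos hc]
        · rw [if_neg hc, if_neg hc]
          rw [ih (arr.length - (i + 1 + ((arr.drop (i + 1)).takeWhile (· == arr[i])).length))
                (by omega) _ rfl]
          congr 1
          rw [← List.drop_drop, drop_length_takeWhile]
      · rw [bLoop, dif_neg h, List.drop_eq_nil_of_le (by omega)]
        simp [altLoop]

-- ===== VERDICT (by name: the statement is the Claim_ definition above) =====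
theorem count_continuity_spec : Claim_equal_count_continuity := by
  intro arr player _
  unfold Spec_count_continuity count_continuity count_continuity_alt
  rw [PySem.List.foldl_pyRange_zero_pyGetD' arr 0 (countStep player) (0, 0)]
  rw [bLoop_eq_altLoop arr player 0, List.drop_zero]
  rw [← runHit_eq_altLoop]
  by_cases h : 5 ≤ (arr.foldl (countStep player) (0, 0)).2
  · have := (foldl_max_ge_iff player arr 0 0).mp h
    rcases this with h5 | hr
    · omega
    · simp [h, hr]
  · have : ¬ (5 ≤ (0:Int) ∨ runHit player 0 arr = true) := by
      intro hc; exact h ((foldl_max_ge_iff player arr 0 0).mpr hc)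
    push_neg at this
    simp [h, this.2]
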